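-- pv_equiv track=rewrite | github.com/GoLu-Jii/CODE_Sherpa | analyzer/dependency.py | identify_entry_point
-- ===== SOURCE A (Python) =====
-- from typing import Dict, List, Set
--
-- def identify_entry_point(analysis_results: Dict[str, Dict]) -> str | None:
--     """
--     Identify the likely entry point of the codebase.
--
--     Uses strict detection: only files with if __name__ == "__main__"
--
--     Args:
--         analysis_results: Output from analyze_repo_files()
--
--     Returns:
--         Relative path to the entry point file, or None if not found
--
--     Example:
--         >>> identify_entry_point({
--         ...     'app.py': {'entry': True},
--         ...     'service.py': {'entry': False}
--         ... })
--         'app.py'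
--     """
--     entry_points = [
--         file_path
--         for file_path, file_data in analysis_results.items()
--         if file_data.get('entry', False)
--     ]
--
--     # If exactly one entry point, return it
--     if len(entry_points) == 1:
--         return entry_points[0]
--
--     # If multiple entry points, prioritize common names
--     priority_names = ['main.py', 'app.py', '__main__.py', 'run.py', 'start.py']
--     for priority_name in priority_names:
--         if priority_name in entry_points:
--             return priority_name
--
--     # If still multiple, return the first one alphabetically
--     if entry_points:
--         return sorted(entry_points)[0]
--
--     # No entry point found
--     return None
-- ===== SOURCE B (Python) =====
-- def identify_entry_point(analysis_results):
--     priority_names = ['main.py', 'app.py', '__main__.py', 'run.py', 'start.py']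
--     rank = {name: i for i, name in enumerate(priority_names)}
--     entry_points = [
--         file_path
--         for file_path, file_data in analysis_results.items()
--         if file_data.get('entry', False)
--     ]
--     if not entry_points:
--         return None
--     return min(entry_points, key=lambda p: (rank.get(p, len(priority_names)), p))
-- ===== Notes on version B (the rewrite author's own statement) =====
-- stated objective: simpler
-- what changed: A's three-stage selection (len==1 early return, priority-name for-loop, sorted() alphabetical fallback) is replaced by a single min() over entry_points with the composite key (priority rank, path), where the rank dict is built once from the priority list.
import Mathlib
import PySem

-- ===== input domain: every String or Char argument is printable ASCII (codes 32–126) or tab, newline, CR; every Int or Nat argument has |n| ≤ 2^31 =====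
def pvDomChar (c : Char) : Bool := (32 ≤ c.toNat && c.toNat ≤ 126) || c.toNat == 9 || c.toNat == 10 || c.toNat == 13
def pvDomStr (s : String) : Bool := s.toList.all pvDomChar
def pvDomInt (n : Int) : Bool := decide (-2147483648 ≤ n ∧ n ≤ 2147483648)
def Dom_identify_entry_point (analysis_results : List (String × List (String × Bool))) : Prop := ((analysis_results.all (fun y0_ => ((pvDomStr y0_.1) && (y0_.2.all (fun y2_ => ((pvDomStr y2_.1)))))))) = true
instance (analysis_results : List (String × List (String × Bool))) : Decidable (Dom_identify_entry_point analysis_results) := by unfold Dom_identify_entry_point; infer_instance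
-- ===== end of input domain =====

-- B replaces A's three-stage selection (len==1 early return, priority scan, sorted fallback)
-- by a single keyed min over (priority rank, path); objective: simpler.

-- ===== PORT A =====
def identify_entry_point (analysis_results : List (String × List (String × Bool))) : Option String :=
  let entry_points := analysis_results.filterMap
    (fun kv => if PySem.Dict.getD ⟨kv.2⟩ "entry" false then some kv.1 else none)
  if entry_points.length = 1 then
    PySem.List.pyGet? entry_points 0
  else
    match ["main.py", "app.py", "__main__.py", "run.py", "start.py"].find?
        (fun priority_name => entry_points.contains priority_name) with
    | some priority_name => some priority_name
    | none =>
      if entry_points ≠ [] then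
        PySem.List.pyGet? (PySem.List.sorted entry_points (fun x => x) false) 0
      else
        none

-- ===== PORT B =====
def identify_entry_point_alt (analysis_results : List (String × List (String × Bool))) : Option String :=
  let priority_names := ["main.py", "app.py", "__main__.py", "run.py", "start.py"]
  let rank : PySem.Dict String Int :=
    (PySem.List.enumerate priority_names).foldl (fun d p => d.insert p.2 p.1) PySem.Dict.empty
  let entry_points := analysis_results.filterMap
    (fun kv => if PySem.Dict.getD ⟨kv.2⟩ "entry" false then some kv.1 else none)
  if entry_points.isEmpty then none
  else PySem.List.min2? entry_points
    (fun p => PySem.Dict.getD rank p (Int.ofNat priority_names.length)) (fun p => p)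

-- ===== PRECONDITION & SPEC =====
def Spec_identify_entry_point (analysis_results : List (String × List (String × Bool))) (out : Option String) : Prop := out = identify_entry_point_alt analysis_results
instance (analysis_results : List (String × List (String × Bool))) (out : Option String) : Decidable (Spec_identify_entry_point analysis_results out) := by unfold Spec_identify_entry_point; infer_instance

-- ===== CLAIM (what is proved, stated in full; the proofs are below) =====
def Claim_equal_identify_entry_point : Prop := ∀ (analysis_results : List (String × List (String × Bool))), Dom_identify_entry_point analysis_results → Spec_identify_entry_point analysis_results (identify_entry_point analysis_results)


-- ===== LEMMAS AND PROOFS =====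

-- the priority rank of a path, as a plain if-chain
def rankF (p : String) : Int :=
  if p = "main.py" then 0 else if p = "app.py" then 1 else if p = "__main__.py" then 2
  else if p = "run.py" then 3 else if p = "start.py" then 4 else 5

-- lexicographic order on the composite key (rankF p, p)
def lexLe (a b : String) : Prop := rankF a < rankF b ∨ (rankF a = rankF b ∧ a ≤ b)

lemma lexLe_refl (a : String) : lexLe a a := Or.inr ⟨rfl, le_refl _⟩

lemma lexLe_trans {a b c : String} (h1 : lexLe a b) (h2 : lexLe b c) : lexLe a c := by
  rcases h1 with h1 | ⟨h1, h1'⟩ <;> rcases h2 with h2 | ⟨h2, h2'⟩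
  · exact Or.inl (lt_trans h1 h2)
  · exact Or.inl (h2 ▸ h1)
  · exact Or.inl (h1 ▸ h2)
  · exact Or.inr ⟨h1.trans h2, h1'.trans h2'⟩

-- B's rank dictionary, looked up with default 5, is exactly rankF
lemma rank_eq (p : String) :
    PySem.Dict.getD ((PySem.List.enumerate ["main.py", "app.py", "__main__.py", "run.py", "start.py"]).foldl
      (fun (d : PySem.Dict String Int) q => d.insert q.2 q.1) PySem.Dict.empty) p (Int.ofNat 5) = rankF p := by
  have hd : (PySem.List.enumerate ["main.py", "app.py", "__main__.py", "run.py", "start.py"]).foldl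
      (fun (d : PySem.Dict String Int) q => d.insert q.2 q.1) PySem.Dict.empty
      = PySem.Dict.mk [("main.py", 0), ("app.py", 1), ("__main__.py", 2), ("run.py", 3), ("start.py", 4)] := by
    rfl
  rw [hd]
  by_cases h1 : p = "main.py"
  · subst h1; rfl
  by_cases h2 : p = "app.py"
  · subst h2; rfl
  by_cases h3 : p = "__main__.py"
  · subst h3; rfl
  by_cases h4 : p = "run.py"
  · subst h4; rfl
  by_cases h5 : p = "start.py"
  · subst h5; rfl
  have g1 : ¬"main.py" = p := fun h => h1 h.symm
  have g2 : ¬"app.py" = p := fun h => h2 h.symm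
  have g3 : ¬"__main__.py" = p := fun h => h3 h.symm
  have g4 : ¬"run.py" = p := fun h => h4 h.symm
  have g5 : ¬"start.py" = p := fun h => h5 h.symm
  simp [PySem.Dict.getD, PySem.Dict.get?, rankF, h1, h2, h3, h4, h5, g1, g2, g3, g4, g5]

lemma rankF_nonneg (p : String) : 0 ≤ rankF p := by
  unfold rankF; split_ifs <;> omega

lemma rank_inj_lt5 {a b : String} (h : rankF a = rankF b) (h5 : rankF a < 5) : a = b := by
  unfold rankF at h h5
  split_ifs at h h5 <;> simp_all

lemma lex_min_unique {l : List String} {m m' : String}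
    (hm : m ∈ l ∧ ∀ x ∈ l, lexLe m x) (hm' : m' ∈ l ∧ ∀ x ∈ l, lexLe m' x) : m = m' := by
  have h1 := hm.2 m' hm'.1
  have h2 := hm'.2 m hm.1
  rcases h1 with h1 | ⟨h1, h1'⟩ <;> rcases h2 with h2 | ⟨h2, h2'⟩ <;> try omega
  exact le_antisymm h1' h2'

lemma step_le_pos {x m0 : String}
    (hc : (decide (rankF x < rankF m0) || !decide (rankF m0 < rankF x) && decide (x < m0)) = true) :
    lexLe x m0 := by
  rw [Bool.or_eq_true, Bool.and_eq_true, Bool.not_eq_true'] at hc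
  rcases hc with hc | ⟨hc1, hc2⟩
  · exact Or.inl (of_decide_eq_true hc)
  · have h1 : ¬ rankF m0 < rankF x := of_decide_eq_false hc1
    have h2 : x < m0 := of_decide_eq_true hc2
    rcases lt_or_eq_of_le (not_lt.mp h1) with h | h
    · exact Or.inl h
    · exact Or.inr ⟨h, le_of_lt h2⟩

lemma step_le_neg {x m0 : String}
    (hc : ¬ (decide (rankF x < rankF m0) || !decide (rankF m0 < rankF x) && decide (x < m0)) = true) :
    lexLe m0 x := by
  rw [Bool.or_eq_true, Bool.and_eq_true, Bool.not_eq_true'] at hc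
  push Not at hc
  have h1 : ¬ rankF x < rankF m0 := by
    intro h; exact absurd (decide_eq_true h) (by simpa using hc.1)
  rcases lt_or_eq_of_le (not_lt.mp h1) with h | h
  · exact Or.inl h
  · refine Or.inr ⟨h, not_lt.mp ?_⟩
    intro hlt
    have hb : decide (rankF m0 < rankF x) = false := by
      simp only [decide_eq_false_iff_not]; omega
    exact absurd (hc.2 hb) (by simp [hlt])

-- the fold inside min2? (keys (rankF, id)) returns the lexLe-least element
lemma min2_go (f : Option String → String → Option String)
    (hf : ∀ (m x : String), f (some m) x =
      if (decide (rankF x < rankF m) || !decide (rankF m < rankF x) && decide (x < m)) = true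
      then some x else some m)
    (t : List String) (m0 : String) :
    ∃ m, t.foldl f (some m0) = some m ∧ m ∈ m0 :: t ∧ ∀ x ∈ m0 :: t, lexLe m x := by
  induction t generalizing m0 with
  | nil =>
    refine ⟨m0, rfl, by simp, ?_⟩
    intro x hx
    rw [List.mem_cons] at hx
    rcases hx with rfl | h
    · exact lexLe_refl _
    · simp at h
  | cons x t ih =>
    rw [List.foldl_cons, hf m0 x]
    by_cases hc : (decide (rankF x < rankF m0) || !decide (rankF m0 < rankF x) && decide (x < m0)) = true
    · rw [if_pos hc]
      obtain ⟨m, hfold, hmem, hmin⟩ := ih x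
      refine ⟨m, hfold, List.mem_cons_of_mem _ hmem, ?_⟩
      intro y hy
      rw [List.mem_cons] at hy
      rcases hy with rfl | hy
      · exact lexLe_trans (hmin x (by simp)) (step_le_pos hc)
      · exact hmin y hy
    · rw [if_neg hc]
      obtain ⟨m, hfold, hmem, hmin⟩ := ih m0
      refine ⟨m, hfold, ?_, ?_⟩
      · rw [List.mem_cons] at hmem ⊢
        rcases hmem with rfl | h
        · exact Or.inl rfl
        · exact Or.inr (List.mem_cons_of_mem _ h)
      · intro y hy
        rw [List.mem_cons, List.mem_cons] at hy
        rcases hy with rfl | rfl | hy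
        · exact hmin y (by simp)
        · exact lexLe_trans (hmin m0 (by simp)) (step_le_neg hc)
        · exact hmin y (List.mem_cons_of_mem _ hy)

lemma min2_cons (a : String) (t : List String) :
    ∃ m, PySem.List.min2? (a :: t) rankF (fun p => p) = some m
      ∧ m ∈ a :: t ∧ ∀ x ∈ a :: t, lexLe m x := by
  simp only [PySem.List.min2?]
  rw [List.foldl_cons]
  exact min2_go _ (fun m x => rfl) t a

-- a priority name that is present, with no better-ranked name present, is the lexLe-least element
lemma prio_min {l : List String} {n : String} (hn : n ∈ l)
    (hfirst : ∀ q : String, rankF q < rankF n → q ∉ l) (h5 : rankF n < 5)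
    {mB : String} (hBmem : mB ∈ l) (hBmin : ∀ x ∈ l, lexLe mB x) : n = mB := by
  refine lex_min_unique ⟨hn, ?_⟩ ⟨hBmem, hBmin⟩
  intro x hx
  rcases lt_trichotomy (rankF n) (rankF x) with h | h | h
  · exact Or.inl h
  · have hxn : x = n := rank_inj_lt5 h.symm (by omega)
    exact Or.inr ⟨h, le_of_eq hxn.symm⟩
  · exact absurd hx (hfirst x h)

-- A's three-stage selection equals B's keyed min, for any entry_points list l
lemma sel_eq (l : List String) :
    (if l.length = 1 then PySem.List.pyGet? l 0
     else match ["main.py", "app.py", "__main__.py", "run.py", "start.py"].find?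
         (fun priority_name => l.contains priority_name) with
       | some priority_name => some priority_name
       | none =>
         if l ≠ [] then PySem.List.pyGet? (PySem.List.sorted l (fun x => x) false) 0 else none)
    = (if l.isEmpty then none else PySem.List.min2? l rankF (fun p => p)) := by
  cases l with
  | nil => decide
  | cons a t =>
    obtain ⟨mB, hB, hBmem, hBmin⟩ := min2_cons a t
    have hR : (if (a :: t).isEmpty then (none : Option String)
        else PySem.List.min2? (a :: t) rankF (fun p => p)) = some mB := by
      simpa using hB
    rw [hR]
    by_cases hlen : (a :: t).length = 1
    · have ht : t = [] := by simpa using hlen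
      subst ht
      rw [if_pos hlen]
      have hma : mB = a := by simpa using hBmem
      subst hma
      rfl
    · rw [if_neg hlen]
      by_cases c1 : "main.py" ∈ a :: t
      · have hfind : (["main.py", "app.py", "__main__.py", "run.py", "start.py"].find?
            (fun priority_name => (a :: t).contains priority_name)) = some "main.py" := by
          rcases List.mem_cons.mp c1 with h | h <;> simp [List.find?, h]
        rw [hfind]
        show some "main.py" = some mB
        refine congrArg some (prio_min c1 ?_ (by decide) hBmem hBmin)
        intro q hq hmem
        have hn : rankF "main.py" = 0 := by decide
        have h0 := rankF_nonneg q
        omega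
      have d1 : ¬"main.py" = a ∧ "main.py" ∉ t := by
        simpa [List.mem_cons, not_or] using c1
      by_cases c2 : "app.py" ∈ a :: t
      · have hfind : (["main.py", "app.py", "__main__.py", "run.py", "start.py"].find?
            (fun priority_name => (a :: t).contains priority_name)) = some "app.py" := by
          rcases List.mem_cons.mp c2 with h | h <;> simp [List.find?, h, d1.1, d1.2]
        rw [hfind]
        show some "app.py" = some mB
        refine congrArg some (prio_min c2 ?_ (by decide) hBmem hBmin)
        intro q hq hmem
        have hn : rankF "app.py" = 1 := by decide
        have h0 := rankF_nonneg q
        rcases (by omega : rankF q = 0) with hq0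
        · have hqe : q = "main.py" := rank_inj_lt5 (a := q) (b := "main.py") (by rw [hq0]; decide) (by omega)
          exact c1 (hqe ▸ hmem)
      have d2 : ¬"app.py" = a ∧ "app.py" ∉ t := by
        simpa [List.mem_cons, not_or] using c2
      by_cases c3 : "__main__.py" ∈ a :: t
      · have hfind : (["main.py", "app.py", "__main__.py", "run.py", "start.py"].find?
            (fun priority_name => (a :: t).contains priority_name)) = some "__main__.py" := by
          rcases List.mem_cons.mp c3 with h | h <;> simp [List.find?, h, d1.1, d1.2, d2.1, d2.2]
        rw [hfind]
        show some "__main__.py" = some mB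
        refine congrArg some (prio_min c3 ?_ (by decide) hBmem hBmin)
        intro q hq hmem
        have hn : rankF "__main__.py" = 2 := by decide
        have h0 := rankF_nonneg q
        rcases (by omega : rankF q = 0 ∨ rankF q = 1) with hq0 | hq0
        · have hqe : q = "main.py" := rank_inj_lt5 (a := q) (b := "main.py") (by rw [hq0]; decide) (by omega)
          exact c1 (hqe ▸ hmem)
        · have hqe : q = "app.py" := rank_inj_lt5 (a := q) (b := "app.py") (by rw [hq0]; decide) (by omega)
          exact c2 (hqe ▸ hmem)
      have d3 : ¬"__main__.py" = a ∧ "__main__.py" ∉ t := by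
        simpa [List.mem_cons, not_or] using c3
      by_cases c4 : "run.py" ∈ a :: t
      · have hfind : (["main.py", "app.py", "__main__.py", "run.py", "start.py"].find?
            (fun priority_name => (a :: t).contains priority_name)) = some "run.py" := by
          rcases List.mem_cons.mp c4 with h | h <;> simp [List.find?, h, d1.1, d1.2, d2.1, d2.2, d3.1, d3.2]
        rw [hfind]
        show some "run.py" = some mB
        refine congrArg some (prio_min c4 ?_ (by decide) hBmem hBmin)
        intro q hq hmem
        have hn : rankF "run.py" = 3 := by decide
        have h0 := rankF_nonneg q
        rcases (by omega : rankF q = 0 ∨ rankF q = 1 ∨ rankF q = 2) with hq0 | hq0 | hq0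
        · have hqe : q = "main.py" := rank_inj_lt5 (a := q) (b := "main.py") (by rw [hq0]; decide) (by omega)
          exact c1 (hqe ▸ hmem)
        · have hqe : q = "app.py" := rank_inj_lt5 (a := q) (b := "app.py") (by rw [hq0]; decide) (by omega)
          exact c2 (hqe ▸ hmem)
        · have hqe : q = "__main__.py" := rank_inj_lt5 (a := q) (b := "__main__.py") (by rw [hq0]; decide) (by omega)
          exact c3 (hqe ▸ hmem)
      have d4 : ¬"run.py" = a ∧ "run.py" ∉ t := by
        simpa [List.mem_cons, not_or] using c4
      by_cases c5 : "start.py" ∈ a :: t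
      · have hfind : (["main.py", "app.py", "__main__.py", "run.py", "start.py"].find?
            (fun priority_name => (a :: t).contains priority_name)) = some "start.py" := by
          rcases List.mem_cons.mp c5 with h | h <;> simp [List.find?, h, d1.1, d1.2, d2.1, d2.2, d3.1, d3.2, d4.1, d4.2]
        rw [hfind]
        show some "start.py" = some mB
        refine congrArg some (prio_min c5 ?_ (by decide) hBmem hBmin)
        intro q hq hmem
        have hn : rankF "start.py" = 4 := by decide
        have h0 := rankF_nonneg q
        rcases (by omega : rankF q = 0 ∨ rankF q = 1 ∨ rankF q = 2 ∨ rankF q = 3) with hq0 | hq0 | hq0 | hq0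
        · have hqe : q = "main.py" := rank_inj_lt5 (a := q) (b := "main.py") (by rw [hq0]; decide) (by omega)
          exact c1 (hqe ▸ hmem)
        · have hqe : q = "app.py" := rank_inj_lt5 (a := q) (b := "app.py") (by rw [hq0]; decide) (by omega)
          exact c2 (hqe ▸ hmem)
        · have hqe : q = "__main__.py" := rank_inj_lt5 (a := q) (b := "__main__.py") (by rw [hq0]; decide) (by omega)
          exact c3 (hqe ▸ hmem)
        · have hqe : q = "run.py" := rank_inj_lt5 (a := q) (b := "run.py") (by rw [hq0]; decide) (by omega)
          exact c4 (hqe ▸ hmem)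
      have d5 : ¬"start.py" = a ∧ "start.py" ∉ t := by
        simpa [List.mem_cons, not_or] using c5
      -- no priority name occurs in l
      have hfind : (["main.py", "app.py", "__main__.py", "run.py", "start.py"].find?
          (fun priority_name => (a :: t).contains priority_name)) = none := by
        simp [List.find?, d1.1, d1.2, d2.1, d2.2, d3.1, d3.2, d4.1, d4.2, d5.1, d5.2]
      rw [hfind]
      have hall : ∀ x ∈ a :: t, rankF x = (5 : Int) := by
        intro x hx
        unfold rankF
        split_ifs with h1 h2 h3 h4 h5
        · exact absurd (h1 ▸ hx) c1
        · exact absurd (h2 ▸ hx) c2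
        · exact absurd (h3 ▸ hx) c3
        · exact absurd (h4 ▸ hx) c4
        · exact absurd (h5 ▸ hx) c5
        · rfl
      cases hs : PySem.List.sorted (a :: t) (fun x => x) false with
      | nil => exact absurd ((PySem.List.sorted_eq_nil_iff _ _ _).mp hs) (by simp)
      | cons m s =>
        rw [if_pos (by simp)]
        have hmmem : m ∈ a :: t := (PySem.List.mem_sorted _ _ _ _).mp (hs ▸ List.mem_cons_self ..)
        have hmmin : ∀ x ∈ a :: t, lexLe m x := by
          intro x hx
          exact Or.inr ⟨(hall m hmmem).trans (hall x hx).symm,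
            PySem.List.key_head_sorted_le (a :: t) (fun x => x) hs x hx⟩
        show PySem.List.pyGet? (m :: s) 0 = some mB
        rw [show PySem.List.pyGet? (m :: s) 0 = some m from by
          simp [PySem.List.pyGet?, PySem.List.pyIdx?]]
        exact congrArg some (lex_min_unique ⟨hmmem, hmmin⟩ ⟨hBmem, hBmin⟩)

-- ===== VERDICT (by name: the statement is the Claim_ definition above) =====
theorem identify_entry_point_spec : Claim_equal_identify_entry_point := by
  intro ar _
  unfold Spec_identify_entry_point
  show (if (ar.filterMap (fun kv => if PySem.Dict.getD ⟨kv.2⟩ "entry" false then some kv.1 else none)).length = 1 then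
      PySem.List.pyGet? (ar.filterMap (fun kv => if PySem.Dict.getD ⟨kv.2⟩ "entry" false then some kv.1 else none)) 0
    else
      match ["main.py", "app.py", "__main__.py", "run.py", "start.py"].find?
          (fun priority_name => (ar.filterMap (fun kv => if PySem.Dict.getD ⟨kv.2⟩ "entry" false then some kv.1 else none)).contains priority_name) with
      | some priority_name => some priority_name
      | none =>
        if ar.filterMap (fun kv => if PySem.Dict.getD ⟨kv.2⟩ "entry" false then some kv.1 else none) ≠ [] then
          PySem.List.pyGet? (PySem.List.sorted (ar.filterMap (fun kv => if PySem.Dict.getD ⟨kv.2⟩ "entry" false then some kv.1 else none)) (fun x => x) false) 0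
        else none)
    = (if (ar.filterMap (fun kv => if PySem.Dict.getD ⟨kv.2⟩ "entry" false then some kv.1 else none)).isEmpty then none
       else PySem.List.min2? (ar.filterMap (fun kv => if PySem.Dict.getD ⟨kv.2⟩ "entry" false then some kv.1 else none))
         (fun p => PySem.Dict.getD ((PySem.List.enumerate ["main.py", "app.py", "__main__.py", "run.py", "start.py"]).foldl
           (fun (d : PySem.Dict String Int) q => d.insert q.2 q.1) PySem.Dict.empty) p (Int.ofNat 5)) (fun p => p))
  have hk : (fun p => PySem.Dict.getD ((PySem.List.enumerate ["main.py", "app.py", "__main__.py", "run.py", "start.py"]).foldl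
      (fun (d : PySem.Dict String Int) q => d.insert q.2 q.1) PySem.Dict.empty) p (Int.ofNat 5)) = rankF := by
    funext p; exact rank_eq p
  rw [hk]
  exact sel_eq _
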